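-- pv_equiv track=rewrite | github.com/gilad-teller/tmnt_classes | lib/files.py | sentenceFromFile
-- ===== SOURCE A (Python) =====
-- def sentenceFromFile(fileName):
--     fileName = fileName.split(".")[0]
--     sentence = ""
--     for c in fileName:
--         if c == "_" or c == "-":
--             sentence += " "
--             continue
--         if c.isupper() and (sentence
--                             and sentence[len(sentence) - 1].islower()):
--             sentence += " "
--         sentence += c
--     return sentence.strip()
-- ===== SOURCE B (Python) =====
-- def sentenceFromFile(fileName):
--     # cut-index algorithm: normalize separators, find boundary indices,
--     # then assemble by slicing the normalized string at those cut points.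
--     norm = "".join(" " if c in "_-" else c for c in fileName.split(".")[0])
--     cuts = [i for i in range(1, len(norm))
--             if norm[i].isupper() and norm[i - 1].islower()]
--
--     def assemble(start, cuts):
--         if not cuts:
--             return norm[start:]
--         return norm[start:cuts[0]] + " " + assemble(cuts[0], cuts[1:])
--
--     return assemble(0, cuts).strip()
-- ===== Notes on version B (the rewrite author's own statement) =====
-- stated objective: alternative
-- what changed: B replaces A's single accumulator loop (which inspects the last character of the growing output) with a cut-index algorithm: it normalizes separators to spaces, computes the list of boundary indices where a lowercase is followed by an uppercase, and then assembles the result recursively from slices of the normalized string joined by single spaces.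
import Mathlib
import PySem

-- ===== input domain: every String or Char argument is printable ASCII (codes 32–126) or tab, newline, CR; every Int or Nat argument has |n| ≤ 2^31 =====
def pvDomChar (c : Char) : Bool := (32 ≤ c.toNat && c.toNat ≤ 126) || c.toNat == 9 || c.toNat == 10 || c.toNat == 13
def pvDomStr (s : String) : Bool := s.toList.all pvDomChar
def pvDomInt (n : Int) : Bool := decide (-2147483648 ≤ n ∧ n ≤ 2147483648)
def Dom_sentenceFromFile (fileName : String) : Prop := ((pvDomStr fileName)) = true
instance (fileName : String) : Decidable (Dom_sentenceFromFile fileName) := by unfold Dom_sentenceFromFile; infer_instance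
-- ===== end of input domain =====

-- B replaces A's accumulator loop with a cut-index algorithm (normalize, find
-- boundary indices, assemble from slices); same complexity, alternative structure.

-- ===== PORT A =====
-- Port of A: one fold over the characters, growing `sentence` and inspecting
-- its last character (`sentence and sentence[len(sentence)-1].islower()` is the
-- getLast? match; `fileName.split(".")[0]` is split?/head).
def pvAStep (s : List Char) (c : Char) : List Char :=
  if c = '_' ∨ c = '-' then s ++ [' ']
  else if PySem.Chars.isupper c &&
          (match s.getLast? with | some d => PySem.Chars.islower d | none => false) then
    s ++ [' '] ++ [c]
  else s ++ [c]

def sentenceFromFile (fileName : String) : String :=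
  let base := ((PySem.Str.split? fileName ".").getD []).headD ""
  let sentence := base.toList.foldl pvAStep []
  PySem.Str.strip (String.ofList sentence)

-- ===== PORT B =====
-- Port of B: normalize separators to spaces, compute the cut indices
-- `[i for i in range(1, len(norm)) if norm[i].isupper() and norm[i-1].islower()]`,
-- then assemble recursively from slices norm[start:cut] joined by " ".
def pvBNorm (c : Char) : Char := if c = '_' ∨ c = '-' then ' ' else c

-- `norm[i].isupper() and norm[i-1].islower()`; indices produced by range(1, len) are
-- always in range, the `none` branches are unreachable totality guards.
def pvCutP (nl : List Char) (i : Int) : Bool :=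
  match PySem.List.pyGet? nl i, PySem.List.pyGet? nl (i - 1) with
  | some c, some p => PySem.Chars.isupper c && PySem.Chars.islower p
  | _, _ => false

def pvAssemble (nl : List Char) : Int → List Int → List Char
  | start, [] => PySem.List.slice nl (some start) none
  | start, i :: cs => PySem.List.slice nl (some start) (some i) ++ ' ' :: pvAssemble nl i cs

def sentenceFromFile_alt (fileName : String) : String :=
  let base := ((PySem.Str.split? fileName ".").getD []).headD ""
  let norm := base.toList.map pvBNorm
  let cuts := (PySem.List.pyRange 1 (norm.length : Int) 1).filter (pvCutP norm)
  PySem.Str.strip (String.ofList (pvAssemble norm 0 cuts))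

-- ===== PRECONDITION & SPEC =====
def Spec_sentenceFromFile (fileName : String) (out : String) : Prop := out = sentenceFromFile_alt fileName
instance (fileName : String) (out : String) : Decidable (Spec_sentenceFromFile fileName out) := by unfold Spec_sentenceFromFile; infer_instance

-- ===== CLAIM (what is proved, stated in full; the proofs are below) =====
def Claim_equal_sentenceFromFile : Prop := ∀ (fileName : String), Dom_sentenceFromFile fileName → Spec_sentenceFromFile fileName (sentenceFromFile fileName)

-- ===== LEMMAS AND PROOFS =====

-- Boundary test: insert a space before `c` when the previous normalized char `p` is lower.
def pvB (p : Option Char) (c : Char) : Bool :=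
  match p with | some d => PySem.Chars.isupper c && PySem.Chars.islower d | none => false

def pvEmit (p : Option Char) (c : Char) : List Char := if pvB p c then [' ', c] else [c]

-- Canonical form: the normalized characters with a space inserted at each boundary.
def pvIns : Option Char → List Char → List Char
  | _, [] => []
  | p, c :: t => pvEmit p c ++ pvIns (some c) t

-- A's step appends exactly the emission for (last of s, normalized c).
lemma pvAStep_eq_emit (s : List Char) (c : Char) :
    pvAStep s c = s ++ pvEmit s.getLast? (pvBNorm c) := by
  unfold pvAStep pvEmit pvB pvBNorm
  by_cases h : c = '_' ∨ c = '-'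
  · simp only [if_pos h]
    cases hl : s.getLast? with
    | none => simp
    | some d => simp [PySem.Chars.isupper]
  · simp only [if_neg h]
    cases hl : s.getLast? with
    | none => simp
    | some d =>
      by_cases hc : (PySem.Chars.isupper c && PySem.Chars.islower d) = true
      · simp [hc]
      · simp [hc]

lemma pvAStep_getLast? (s : List Char) (c : Char) :
    (pvAStep s c).getLast? = some (pvBNorm c) := by
  rw [pvAStep_eq_emit]
  unfold pvEmit pvB pvBNorm
  by_cases h : c = '_' ∨ c = '-'
  · cases hl : s.getLast? with
    | none => simp [h]
    | some d => simp [h, PySem.Chars.isupper]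
  · cases hl : s.getLast? with
    | none => simp [h]
    | some d =>
      by_cases hc : (PySem.Chars.isupper c && PySem.Chars.islower d) = true
      · simp [h, hc]
      · simp [h, hc]

-- A-side invariant: the fold equals the accumulator followed by the canonical form.
lemma pvFoldA (l : List Char) (s : List Char) :
    l.foldl pvAStep s = s ++ pvIns s.getLast? (l.map pvBNorm) := by
  induction l generalizing s with
  | nil => simp [pvIns]
  | cons c l ih =>
    simp only [List.foldl_cons, List.map_cons, pvIns]
    rw [ih (pvAStep s c), pvAStep_getLast?, pvAStep_eq_emit, List.append_assoc]

-- Nat-level cut scan and assembly, the proof-side mirrors of B's computations.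
def pvNatCuts : Option Char → Nat → List Char → List Nat
  | _, _, [] => []
  | p, k, c :: t => (if pvB p c then [k] else []) ++ pvNatCuts (some c) (k + 1) t

def pvNatAssemble (nl : List Char) : Nat → List Nat → List Char
  | start, [] => nl.drop start
  | start, i :: cs => (nl.drop start).take (i - start) ++ ' ' :: pvNatAssemble nl i cs

lemma pvNatCuts_ge (p : Option Char) (k : Nat) (t : List Char) :
    ∀ i ∈ pvNatCuts p k t, k ≤ i := by
  induction t generalizing p k with
  | nil => simp [pvNatCuts]
  | cons c t ih =>
    intro i hi
    simp only [pvNatCuts, List.mem_append] at hi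
    rcases hi with hi | hi
    · split at hi <;> simp_all
    · exact Nat.le_of_succ_le (ih (some c) (k + 1) i hi)

-- Bridge: B's Int assembly is the Nat assembly on cast cut lists.
lemma pvAssemble_natCast (nl : List Char) (k : Nat) (cs : List Nat) :
    pvAssemble nl (k : Int) (cs.map Int.ofNat) = pvNatAssemble nl k cs := by
  induction cs generalizing k with
  | nil => simp [pvAssemble, pvNatAssemble, PySem.List.slice_from_natCast]
  | cons i cs ih =>
    rw [List.map_cons]
    show PySem.List.slice nl (some (k : Int)) (some ((i : Nat) : Int)) ++ ' ' :: pvAssemble nl (Int.ofNat i) (cs.map Int.ofNat) = _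
    rw [PySem.List.slice_natCast, pvNatAssemble]
    have : (Int.ofNat i) = ((i : Nat) : Int) := rfl
    rw [this, ih i]

-- Filtering range(1, n) with the index test is the recursive cut scan.
lemma pvFilter_eq_natCuts (nl : List Char) (t : List Char) (k : Nat) (c : Char)
    (hk : 1 ≤ k) (ht : nl.drop k = t) (hc : nl[k - 1]? = some c) :
    (PySem.List.pyRange (k : Int) (nl.length : Int) 1).filter (pvCutP nl)
      = (pvNatCuts (some c) k t).map Int.ofNat := by
  induction t generalizing k c with
  | nil =>
    have hlen : nl.length ≤ k := List.drop_eq_nil_iff.mp ht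
    have : PySem.List.pyRange (k : Int) (nl.length : Int) 1 = [] := by
      rw [PySem.List.pyRange_one]
      have : ((nl.length : Int) - (k : Int)).toNat = 0 := by omega
      simp [this]
    simp [this, pvNatCuts]
  | cons c' t ih =>
    have hklt : k < nl.length := by
      by_contra h
      rw [List.drop_eq_nil_of_le (by omega)] at ht; exact absurd ht (by simp)
    have hget : nl[k]? = some c' := by
      have : (nl.drop k)[0]? = some c' := by rw [ht]; rfl
      simpa using this
    have hdrop : nl.drop (k + 1) = t := by
      have : (nl.drop k).drop 1 = nl.drop (k + 1) := by
        rw [List.drop_drop]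
      rw [← this, ht]; rfl
    have hrange : PySem.List.pyRange (k : Int) (nl.length : Int) 1
        = (k : Int) :: PySem.List.pyRange ((k : Int) + 1) (nl.length : Int) 1 :=
      PySem.List.pyRange_one_cons (by exact_mod_cast hklt)
    have hcut : pvCutP nl (k : Int) = pvB (some c) c' := by
      unfold pvCutP pvB
      have h1 : (k : Int) - 1 = ((k - 1 : Nat) : Int) := by omega
      rw [h1]
      simp [PySem.List.pyGet?_natCast, hget, hc]
    have hrec := ih (k + 1) c' (by omega) hdrop (by simpa using hget)
    rw [hrange]
    simp only [List.filter_cons, hcut]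
    have hcast : ((k : Int) + 1) = ((k + 1 : Nat) : Int) := by omega
    rw [hcast, hrec]
    by_cases hb : pvB (some c) c' = true
    · simp [pvNatCuts, hb]
    · simp [pvNatCuts, hb]

-- Shift: assembling from position k with cuts all past k starts by copying nl[k].
lemma pvNatAssemble_shift (nl : List Char) (k : Nat) (c : Char) (cs : List Nat)
    (hget : nl.drop k = c :: nl.drop (k + 1))
    (hhd : ∀ i, cs.head? = some i → k < i) :
    pvNatAssemble nl k cs = c :: pvNatAssemble nl (k + 1) cs := by
  cases cs with
  | nil => simp [pvNatAssemble, hget]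
  | cons i cs =>
    have hki : k < i := hhd i rfl
    simp only [pvNatAssemble, hget]
    have : i - k = (i - (k + 1)) + 1 := by omega
    rw [this, List.take_succ_cons]
    simp

-- The Nat assembly over the scanned cuts is the canonical insertion form.
lemma pvNatAssemble_cuts (nl : List Char) (t : List Char) (k : Nat) (p : Option Char)
    (ht : nl.drop k = t) :
    pvNatAssemble nl k (pvNatCuts p k t) = pvIns p t := by
  induction t generalizing k p with
  | nil => simp [pvNatCuts, pvNatAssemble, ht, pvIns]
  | cons c t ih =>
    have hdrop : nl.drop (k + 1) = t := by
      have : (nl.drop k).drop 1 = nl.drop (k + 1) := by rw [List.drop_drop]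
      rw [← this, ht]; rfl
    have hget : nl.drop k = c :: nl.drop (k + 1) := by rw [ht, hdrop]
    have hhd : ∀ i, (pvNatCuts (some c) (k + 1) t).head? = some i → k < i := by
      intro i hi
      have : i ∈ pvNatCuts (some c) (k + 1) t := by
        cases h : pvNatCuts (some c) (k + 1) t with
        | nil => rw [h] at hi; simp at hi
        | cons a l => rw [h] at hi; simp at hi; simp [hi]
      have := pvNatCuts_ge (some c) (k + 1) t i this
      omega
    simp only [pvNatCuts, pvIns, pvEmit]
    cases hb : pvB p c with
    | true =>
      simp only [if_true, List.singleton_append]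
      show pvNatAssemble nl k (k :: pvNatCuts (some c) (k + 1) t) = _
      simp only [pvNatAssemble, Nat.sub_self, List.take_zero, List.nil_append]
      rw [pvNatAssemble_shift nl k c _ hget hhd, ih (k + 1) (some c) hdrop]
      simp
    | false =>
      have e1 : (if false = true then [k] else ([] : List Nat)) = [] := rfl
      have e2 : (if false = true then [' ', c] else [c]) = [c] := rfl
      rw [e1, e2, List.nil_append]
      rw [pvNatAssemble_shift nl k c _ hget hhd, ih (k + 1) (some c) hdrop]
      simp

-- B's whole list-level computation equals the canonical form.
lemma pvB_eq_ins (nl : List Char) :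
    pvAssemble nl 0 ((PySem.List.pyRange 1 (nl.length : Int) 1).filter (pvCutP nl))
      = pvIns none nl := by
  cases nl with
  | nil =>
    have : PySem.List.pyRange 1 ((List.length ([] : List Char)) : Int) 1 = [] := by
      rw [PySem.List.pyRange_one]; simp
    rw [this]
    simp [pvAssemble, pvIns, PySem.List.slice_from]
  | cons c t =>
    have h2 : (PySem.List.pyRange 1 (((c :: t).length : Nat) : Int) 1).filter (pvCutP (c :: t))
        = (pvNatCuts (some c) 1 t).map Int.ofNat :=
      pvFilter_eq_natCuts (c :: t) t 1 c (by omega) (by simp) (by simp)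
    have h3 : pvAssemble (c :: t) 0 ((pvNatCuts (some c) 1 t).map Int.ofNat)
        = pvNatAssemble (c :: t) 0 (pvNatCuts (some c) 1 t) :=
      pvAssemble_natCast (c :: t) 0 (pvNatCuts (some c) 1 t)
    rw [h2, h3]
    have hhd : ∀ i, (pvNatCuts (some c) 1 t).head? = some i → 0 < i := by
      intro i hi
      have : i ∈ pvNatCuts (some c) 1 t := by
        cases h : pvNatCuts (some c) 1 t with
        | nil => rw [h] at hi; simp at hi
        | cons a l => rw [h] at hi; simp at hi; simp [hi]
      have := pvNatCuts_ge (some c) 1 t i this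
      omega
    rw [pvNatAssemble_shift (c :: t) 0 c _ (by simp) hhd,
        pvNatAssemble_cuts (c :: t) t 1 (some c) (by simp)]
    simp [pvIns, pvEmit, pvB]

-- ===== VERDICT (by name: the statement is the Claim_ definition above) =====
theorem sentenceFromFile_spec : Claim_equal_sentenceFromFile := by
  intro fileName _
  show _ = _
  simp only [sentenceFromFile, sentenceFromFile_alt, pvFoldA, pvB_eq_ins,
    List.nil_append, List.getLast?_nil]
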